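-- pv_equiv track=rewrite | github.com/pypi-data/pypi-mirror-400 | packages/speedbuild/speedbuild-0.1.8.tar.gz/speedbuild-0.1.8/speedbuild/agent/tools/update_file.py | addLeadingWhiteSpaces
-- ===== SOURCE A (Python) =====
-- def addLeadingWhiteSpaces(code,count):
--     cleaned = []
--
--     if count == 0:
--         return code
--
--     lines = code['code'].split("\n")
--     for line in lines:
--         cleaned.append(" "*count+line)
--
--     cleaned = "\n".join(cleaned)
--
--     return {"name":code['name'],"code":cleaned}
-- ===== SOURCE B (Python) =====
-- def addLeadingWhiteSpaces(code, count):
--     if count == 0: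
--         return code
--     prefix = " " * count
--     parts = [prefix]
--     for ch in code["code"]:
--         parts.append(ch)
--         if ch == "\n":
--             parts.append(prefix)
--     return {"name": code["name"], "code": "".join(parts)}
-- ===== Notes on version B (the rewrite author's own statement) =====
-- stated objective: alternative
-- what changed: Replaces A's split-into-lines / loop-prepend / rejoin pipeline with a single character-level pass that emits the prefix once up front and again after every newline character, joining the fragments at the end; no line list is ever materialized.
import Mathlib
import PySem

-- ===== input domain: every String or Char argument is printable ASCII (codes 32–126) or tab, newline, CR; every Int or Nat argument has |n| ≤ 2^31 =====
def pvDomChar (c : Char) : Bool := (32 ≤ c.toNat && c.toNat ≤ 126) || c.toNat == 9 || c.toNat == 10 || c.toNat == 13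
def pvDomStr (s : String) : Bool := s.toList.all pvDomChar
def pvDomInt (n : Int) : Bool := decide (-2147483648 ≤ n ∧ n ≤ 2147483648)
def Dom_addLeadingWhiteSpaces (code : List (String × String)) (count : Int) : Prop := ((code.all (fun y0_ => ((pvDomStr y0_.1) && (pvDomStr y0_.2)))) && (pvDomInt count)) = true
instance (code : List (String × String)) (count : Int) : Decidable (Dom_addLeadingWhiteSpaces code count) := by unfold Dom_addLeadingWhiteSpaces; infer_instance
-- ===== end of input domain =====

-- B replaces A's split-into-lines / loop-prepend / rejoin pipeline with one character-level pass
-- that emits the prefix up front and again after every newline; equivalence is on the return value.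

-- ===== PORT A =====
-- cleaned = []; if count == 0: return code;
-- lines = code['code'].split("\n"); for line: cleaned.append(" "*count+line);
-- cleaned = "\n".join(cleaned); return {"name": code['name'], "code": cleaned}
def addLeadingWhiteSpaces (code : List (String × String)) (count : Int) : List (String × String) :=
  if count = 0 then code
  else
    match (PySem.Dict.mk code).get? "code", (PySem.Dict.mk code).get? "name" with
    | some c, some n =>
      let lines := PySem.Chars.splitOn c.toList ['\n']
      let cleaned := lines.foldl (fun acc line => acc ++ [PySem.List.pyRepeat [' '] count ++ line]) []
      [("name", n), ("code", String.ofList (PySem.Chars.join ['\n'] cleaned))]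
    | _, _ => []    -- Python raises KeyError here; excluded by Pre_

-- ===== PORT B =====
-- if count == 0: return code; prefix = " "*count; parts = [prefix];
-- for ch in code['code']: parts.append(ch); if ch == '\n': parts.append(prefix)
-- return {"name": code['name'], "code": "".join(parts)}
def addLeadingWhiteSpaces_alt (code : List (String × String)) (count : Int) : List (String × String) :=
  if count = 0 then code
  else
    let pfx := PySem.List.pyRepeat [' '] count
    match (PySem.Dict.mk code).get? "code" with
    | none => []    -- Python raises KeyError here; excluded by Pre_
    | some c =>
      let parts := c.toList.foldl
        (fun acc ch =>
          let acc := acc ++ [[ch]]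
          if ch = '\n' then acc ++ [pfx] else acc) [pfx]
      match (PySem.Dict.mk code).get? "name" with
      | none => []    -- Python raises KeyError here; excluded by Pre_
      | some n => [("name", n), ("code", String.ofList parts.flatten)]  -- "".join(parts)

-- ===== PRECONDITION & SPEC =====
-- Pre_ excludes only the inputs on which A raises KeyError: count ≠ 0 with key "code" or "name" missing.
def Pre_addLeadingWhiteSpaces (code : List (String × String)) (count : Int) : Prop :=
  count = 0 ∨ (((PySem.Dict.mk code).get? "code").isSome ∧ ((PySem.Dict.mk code).get? "name").isSome)
instance (code : List (String × String)) (count : Int) : Decidable (Pre_addLeadingWhiteSpaces code count) := by unfold Pre_addLeadingWhiteSpaces; infer_instance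
def pvWitness_addLeadingWhiteSpaces : (List (String × String)) × Int := ([("name", "f"), ("code", "a\nb")], 2)

def Spec_addLeadingWhiteSpaces (code : List (String × String)) (count : Int) (out : List (String × String)) : Prop := out = addLeadingWhiteSpaces_alt code count
instance (code : List (String × String)) (count : Int) (out : List (String × String)) : Decidable (Spec_addLeadingWhiteSpaces code count out) := by unfold Spec_addLeadingWhiteSpaces; infer_instance

-- ===== CLAIM (what is proved, stated in full; the proofs are below) =====
def Claim_equal_addLeadingWhiteSpaces : Prop := ∀ (code : List (String × String)) (count : Int), Dom_addLeadingWhiteSpaces code count → Pre_addLeadingWhiteSpaces code count → Spec_addLeadingWhiteSpaces code count (addLeadingWhiteSpaces code count)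

-- ===== LEMMAS AND PROOFS =====

-- unfolding equations for the fuel-based PySem.Chars.splitOn.go
theorem splitOnGo_nil (sep cur : List Char) (f : Nat) (acc : List (List Char)) :
    PySem.Chars.splitOn.go sep (f+1) [] cur acc = (cur.reverse :: acc).reverse := by
  rw [PySem.Chars.splitOn.go]; omega

theorem splitOnGo_cons (sep : List Char) (f : Nat) (c : Char) (rest cur : List Char) (acc : List (List Char)) :
    PySem.Chars.splitOn.go sep (f+1) (c::rest) cur acc =
      if sep.isPrefixOf (c::rest) then PySem.Chars.splitOn.go sep f (List.drop sep.length (c::rest)) [] (cur.reverse::acc)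
      else PySem.Chars.splitOn.go sep f rest (c::cur) acc := by
  rw [PySem.Chars.splitOn.go]

-- reference single-character splitter
def mySplit (s : List Char) (d : Char) : List (List Char) :=
  match s with
  | [] => [[]]
  | c :: t => if c = d then [] :: mySplit t d else (mySplit t d).modifyHead (c :: ·)

theorem mySplit_ne_nil (s : List Char) (d : Char) : mySplit s d ≠ [] := by
  induction s with
  | nil => simp [mySplit]
  | cons c t ih =>
    simp only [mySplit]
    split_ifs
    · simp
    · cases h : mySplit t d with
      | nil => exact absurd h ih
      | cons a l => simp

theorem splitOnGo_eq_mySplit (d : Char) (l : List Char) :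
    ∀ (fuel : Nat) (cur : List Char) (acc : List (List Char)), l.length < fuel →
      PySem.Chars.splitOn.go [d] fuel l cur acc =
        acc.reverse ++ (mySplit l d).modifyHead (cur.reverse ++ ·) := by
  induction l with
  | nil =>
    intro fuel cur acc h
    obtain ⟨f, rfl⟩ : ∃ f, fuel = f + 1 := ⟨fuel - 1, by omega⟩
    simp [splitOnGo_nil, mySplit]
  | cons c rest ih =>
    intro fuel cur acc h
    obtain ⟨f, rfl⟩ : ∃ f, fuel = f + 1 := ⟨fuel - 1, by omega⟩
    rw [splitOnGo_cons]
    by_cases hc : c = d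
    · subst hc
      have hpre : ([c].isPrefixOf (c::rest)) = true := by simp [List.isPrefixOf]
      rw [if_pos hpre]
      have hd : List.drop ([c] : List Char).length (c::rest) = rest := by simp
      rw [hd, ih f [] (cur.reverse :: acc) (by simpa using Nat.lt_of_succ_lt_succ h)]
      simp [mySplit]
      cases hm : mySplit rest c with
      | nil => exact absurd hm (mySplit_ne_nil rest c)
      | cons a l => simp
    · have hpre : ([d].isPrefixOf (c::rest)) = false := by
        simp [List.isPrefixOf]; exact fun hdc => absurd hdc.symm hc
      rw [hpre]
      simp only [Bool.false_eq_true, if_false]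
      rw [ih f (c :: cur) acc (by simpa using Nat.lt_of_succ_lt_succ h)]
      simp only [mySplit, hc, if_false]
      cases hm : mySplit rest d with
      | nil => exact absurd hm (mySplit_ne_nil rest d)
      | cons a l => simp

theorem splitOn_eq_mySplit (s : List Char) (d : Char) :
    PySem.Chars.splitOn s [d] = mySplit s d := by
  have h := splitOnGo_eq_mySplit d s (s.length + 1) [] [] (by omega)
  rw [PySem.Chars.splitOn, h]
  cases mySplit s d <;> simp

theorem join_mySplit (p : List Char) (s : List Char) :
    ∀ q : List Char,
      PySem.Chars.join ['\n'] (((mySplit s '\n').modifyHead (q ++ ·)).map (p ++ ·)) =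
        p ++ q ++ s.flatMap (fun c => if c = '\n' then '\n' :: p else [c]) := by
  induction s with
  | nil => intro q; simp [mySplit, PySem.Chars.join_singleton]
  | cons c t ih =>
    intro q
    by_cases hc : c = '\n'
    · subst hc
      cases hm : mySplit t '\n' with
      | nil => exact absurd hm (mySplit_ne_nil t '\n')
      | cons a l =>
        have hs : mySplit ('\n' :: t) '\n' = [] :: a :: l := by simp [mySplit, hm]
        have ihq := ih []
        rw [hm] at ihq
        simp only [List.modifyHead_cons, List.nil_append] at ihq
        rw [hs]
        simp only [List.modifyHead_cons, List.map_cons, List.append_nil]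
        rw [PySem.Chars.join_cons_cons]
        simp only [List.map_cons] at ihq
        rw [ihq]
        simp
    · cases hm : mySplit t '\n' with
      | nil => exact absurd hm (mySplit_ne_nil t '\n')
      | cons a l =>
        have hs : mySplit (c :: t) '\n' = (c :: a) :: l := by simp [mySplit, hc, hm]
        have ihq := ih (q ++ [c])
        rw [hm] at ihq
        simp only [List.modifyHead_cons] at ihq
        rw [hs]
        simp only [List.modifyHead_cons]
        have harr : q ++ c :: a = (q ++ [c]) ++ a := by simp
        rw [harr, ihq]
        simp [hc]

-- A's pipeline (split, prepend to each line, rejoin) equals the character-level flatMap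
theorem a_side_identity (p : List Char) (s : List Char) :
    PySem.Chars.join ['\n'] ((PySem.Chars.splitOn s ['\n']).map (p ++ ·)) =
      p ++ s.flatMap (fun c => if c = '\n' then '\n' :: p else [c]) := by
  rw [splitOn_eq_mySplit]
  have := join_mySplit p s []
  have hmod : (mySplit s '\n').modifyHead (([] : List Char) ++ ·) = mySplit s '\n' := by
    cases mySplit s '\n' <;> simp
  rw [hmod] at this
  simpa using this

-- B's fragment-accumulating character loop, flattened, is the same flatMap
theorem b_side_identity (p : List Char) (s : List Char) :
    ∀ init : List (List Char),
      (s.foldl (fun acc ch =>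
          let acc := acc ++ [[ch]]
          if ch = '\n' then acc ++ [p] else acc) init).flatten =
        init.flatten ++ s.flatMap (fun c => if c = '\n' then '\n' :: p else [c]) := by
  induction s with
  | nil => intro init; simp
  | cons c t ih =>
    intro init
    by_cases hc : c = '\n'
    · subst hc
      simp only [List.foldl_cons, if_pos]
      rw [ih]
      simp
    · simp only [List.foldl_cons, if_neg hc]
      rw [ih]
      simp [hc]

-- ===== VERDICT (by name: the statement is the Claim_ definition above) =====
theorem addLeadingWhiteSpaces_spec : Claim_equal_addLeadingWhiteSpaces := by
  intro code count _ hpre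
  unfold Spec_addLeadingWhiteSpaces addLeadingWhiteSpaces addLeadingWhiteSpaces_alt
  by_cases h0 : count = 0
  · simp [h0]
  · simp only [h0, if_false]
    rcases hpre with h | ⟨hc, hn⟩
    · exact absurd h h0
    · obtain ⟨c, hc⟩ := Option.isSome_iff_exists.mp hc
      obtain ⟨n, hn⟩ := Option.isSome_iff_exists.mp hn
      rw [hc, hn]
      simp only []
      rw [PySem.List.foldl_append_singleton_eq_map]
      rw [b_side_identity, List.nil_append, a_side_identity]
      simp
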